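-- pv_equiv track=rewrite | github.com/Poly560/lab_python | lab5.py | keep_all_menus
-- ===== SOURCE A (Python) =====
-- def keep_all_menus(fruits, days):
--     all_menus=[]
--     def create_a_menu(menu, day):
--         if day==days:
--             all_menus.append(menu.copy())
--             return
--         if day == days - 2 or day == days - 1:
--             menu.append('ф2')
--             create_a_menu(menu, day + 1)
--             menu.pop()
--         else:
--             for f in fruits:
--                 menu.append(f)
--                 create_a_menu(menu, day + 1)
--                 menu.pop()
--     create_a_menu([], 0)
--     return all_menus
-- ===== SOURCE B (Python) =====
-- def keep_all_menus(fruits, days):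
--     menus = [[]]
--     for day in range(days):
--         if day >= days - 2:
--             menus = [m + ['ф2'] for m in menus]
--         else:
--             menus = [m + [f] for m in menus for f in fruits]
--     return menus
-- ===== Notes on version B (the rewrite author's own statement) =====
-- stated objective: simpler
-- what changed: Replaces the recursive DFS with a mutable menu and an accumulator closure by an iterative breadth-wise build: start from [[]] and per day extend every partial menu (with the fixed 'ф2' on the last two days, else with each fruit).
-- outside the precondition, e.g. on keep_all_menus([], -1): A returns [], B returns [[]]
import Mathlib
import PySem

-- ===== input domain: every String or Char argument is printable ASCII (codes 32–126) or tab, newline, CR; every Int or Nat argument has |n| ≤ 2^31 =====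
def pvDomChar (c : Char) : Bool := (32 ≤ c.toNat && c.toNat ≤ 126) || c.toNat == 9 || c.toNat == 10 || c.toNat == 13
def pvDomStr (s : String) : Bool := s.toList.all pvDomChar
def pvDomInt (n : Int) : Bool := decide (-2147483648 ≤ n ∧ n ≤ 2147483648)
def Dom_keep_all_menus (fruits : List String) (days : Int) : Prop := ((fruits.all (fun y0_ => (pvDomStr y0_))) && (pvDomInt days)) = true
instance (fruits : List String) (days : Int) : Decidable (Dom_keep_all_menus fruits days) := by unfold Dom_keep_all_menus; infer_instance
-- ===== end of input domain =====

-- B replaces A's recursive DFS (mutable menu + accumulator closure) by an iterative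
-- per-day extension of all partial menus; return value only, no caller-visible mutation.

-- ===== PORT A =====
-- fuel only makes the recursion total (Python recurses on day+1 until day == days);
-- with 0 ≤ days (Pre_) the initial fuel days.toNat + 1 is never exhausted.
def createAMenu (fruits : List String) (days : Int) (fuel : Nat)
    (menu : List String) (day : Int) (acc : List (List String)) : List (List String) :=
  match fuel with
  | 0 => acc
  | fuel + 1 =>
    if day = days then acc ++ [menu]
    else if day = days - 2 ∨ day = days - 1 then
      createAMenu fruits days fuel (menu ++ ["ф2"]) (day + 1) acc
    else
      fruits.foldl (fun acc f => createAMenu fruits days fuel (menu ++ [f]) (day + 1) acc) acc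

def keep_all_menus (fruits : List String) (days : Int) : List (List String) :=
  createAMenu fruits days (days.toNat + 1) [] 0 []

-- ===== PORT B =====
def altStep (fruits : List String) (days : Int) (menus : List (List String)) (day : Int) :
    List (List String) :=
  if days - 2 ≤ day then menus.map (fun m => m ++ ["ф2"])
  else menus.flatMap (fun m => fruits.map (fun f => m ++ [f]))

def keep_all_menus_alt (fruits : List String) (days : Int) : List (List String) :=
  (PySem.List.pyRange 0 days 1).foldl (altStep fruits days) [[]]

-- ===== PRECONDITION & SPEC =====
-- Pre_ excludes negative days, on which A either raises RecursionError (nonempty fruits)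
-- or returns [] only because the empty fruit loop cuts the recursion short (empty fruits) —
-- an accident of the implementation; B returns [[]] on all negative days.
def Pre_keep_all_menus (fruits : List String) (days : Int) : Prop := 0 ≤ days
instance (fruits : List String) (days : Int) : Decidable (Pre_keep_all_menus fruits days) := by
  unfold Pre_keep_all_menus; infer_instance

def pvWitness_keep_all_menus : List String × Int := (["apple", "pear"], 4)

def Spec_keep_all_menus (fruits : List String) (days : Int) (out : List (List String)) : Prop :=
  out = keep_all_menus_alt fruits days
instance (fruits : List String) (days : Int) (out : List (List String)) :
    Decidable (Spec_keep_all_menus fruits days out) := by unfold Spec_keep_all_menus; infer_instance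

-- ===== CLAIM (what is proved, stated in full; the proofs are below) =====
def Claim_equal_keep_all_menus : Prop := ∀ (fruits : List String) (days : Int),
  Dom_keep_all_menus fruits days → Pre_keep_all_menus fruits days →
  Spec_keep_all_menus fruits days (keep_all_menus fruits days)

-- ===== LEMMAS AND PROOFS =====

-- the per-day step distributes over list concatenation
theorem altStep_append (fruits : List String) (days : Int) (m1 m2 : List (List String))
    (day : Int) : altStep fruits days (m1 ++ m2) day =
      altStep fruits days m1 day ++ altStep fruits days m2 day := by
  unfold altStep; split_ifs <;> simp

-- hence the whole fold over a day range distributes over concatenation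
theorem foldl_altStep_append (fruits : List String) (days : Int) (l : List Int)
    (m1 m2 : List (List String)) :
    l.foldl (altStep fruits days) (m1 ++ m2) =
      l.foldl (altStep fruits days) m1 ++ l.foldl (altStep fruits days) m2 := by
  induction l generalizing m1 m2 with
  | nil => rfl
  | cons d l ih => simp only [List.foldl_cons, altStep_append, ih]

-- fold of a list of menus = concatenation of folds of singletons
theorem foldl_altStep_flatMap (fruits : List String) (days : Int) (l : List Int)
    (ms : List (List String)) :
    l.foldl (altStep fruits days) ms = ms.flatMap (fun m => l.foldl (altStep fruits days) [m]) := by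
  induction ms with
  | nil =>
    induction l with
    | nil => rfl
    | cons d l ihl =>
      have hnil : altStep fruits days [] d = [] := by unfold altStep; split_ifs <;> simp
      simpa [hnil] using ihl
  | cons m ms ih =>
    have : (m :: ms) = [m] ++ ms := rfl
    rw [this, foldl_altStep_append, ih]; simp

-- main invariant: A's recursion from (menu, day) produces B's fold over the remaining days
theorem createAMenu_eq (fruits : List String) (days : Int) :
    ∀ (fuel : Nat) (day : Int) (menu : List String) (acc : List (List String)),
      day ≤ days → (days - day).toNat < fuel →
      createAMenu fruits days fuel menu day acc =
        acc ++ (PySem.List.pyRange day days 1).foldl (altStep fruits days) [menu] := by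
  intro fuel
  induction fuel with
  | zero => intro day menu acc _ h; omega
  | succ fuel ih =>
    intro day menu acc hle hfuel
    by_cases hd : day = days
    · subst hd
      simp [createAMenu]
    · have hlt : day < days := lt_of_le_of_ne hle hd
      rw [PySem.List.pyRange_one_cons hlt]
      simp only [List.foldl_cons]
      by_cases h2 : day = days - 2 ∨ day = days - 1
      · have hstep : altStep fruits days [menu] day = [menu ++ ["ф2"]] := by
          unfold altStep
          have : days - 2 ≤ day := by omega
          simp [this]
        rw [hstep]
        unfold createAMenu
        rw [if_neg hd, if_pos h2]
        exact ih (day + 1) (menu ++ ["ф2"]) acc (by omega) (by omega)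
      · have hstep : altStep fruits days [menu] day = fruits.map (fun f => menu ++ [f]) := by
          unfold altStep
          have : ¬ days - 2 ≤ day := by omega
          simp [this]
        rw [hstep]
        unfold createAMenu
        rw [if_neg hd, if_neg h2]
        rw [foldl_altStep_flatMap, List.flatMap_map]
        have hfun : (fun acc f => createAMenu fruits days fuel (menu ++ [f]) (day + 1) acc) =
            (fun (acc : List (List String)) f => acc ++
              (PySem.List.pyRange (day + 1) days 1).foldl (altStep fruits days) [menu ++ [f]]) := by
          funext acc f
          exact ih (day + 1) (menu ++ [f]) acc (by omega) (by omega)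
        rw [hfun]
        exact PySem.List.foldl_append_eq_flatMap _ _ _

theorem keep_all_menus_fn_spec (fruits : List String) (days : Int) (h : 0 ≤ days) :
    keep_all_menus fruits days = keep_all_menus_alt fruits days := by
  unfold keep_all_menus keep_all_menus_alt
  rw [createAMenu_eq fruits days (days.toNat + 1) 0 [] [] h (by omega)]
  simp

-- ===== VERDICT (by name: the statement is the Claim_ definition above) =====
theorem keep_all_menus_spec : Claim_equal_keep_all_menus := by
  intro fruits days _ hpre
  exact keep_all_menus_fn_spec fruits days hpre
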